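-- pv_equiv track=rewrite | github.com/Lorrainnn/Toy-project | Propogation_between_stations/project1.py | group_warning_info
-- ===== SOURCE A (Python) =====
-- def group_warning_info(warning_details):
--     group = {}
--     for detail in warning_details:
--         type, device_receive, text, time = detail
--         if text in group:
--             group[text].append((type, device_receive, text, time))
--         else:
--             group[text] = [(type, device_receive, text,  time)]
--     sorted_data = [sorted(group[text], key=lambda x: x[3]) for text in group]
--     return sorted_data
-- ===== SOURCE B (Python) =====
-- def group_warning_info(warning_details):
--     # One global stable sort by time, then one filtered pass per distinct text
--     # (first-appearance order), instead of a dict of lists sorted per group.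
--     texts = list(dict.fromkeys(d[2] for d in warning_details))
--     by_time = sorted(warning_details, key=lambda x: x[3])
--     return [[(type, device_receive, text, time)
--              for (type, device_receive, text, time) in by_time if text == t]
--             for t in texts]
-- ===== Notes on version B (the rewrite author's own statement) =====
-- stated objective: alternative
-- what changed: Replaces A's dict-of-lists grouping with per-group sorts by one global stable sort by time followed by a filtered pass per distinct text (texts in first-appearance order via dict.fromkeys), relying on stability of sorted.
import Mathlib
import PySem

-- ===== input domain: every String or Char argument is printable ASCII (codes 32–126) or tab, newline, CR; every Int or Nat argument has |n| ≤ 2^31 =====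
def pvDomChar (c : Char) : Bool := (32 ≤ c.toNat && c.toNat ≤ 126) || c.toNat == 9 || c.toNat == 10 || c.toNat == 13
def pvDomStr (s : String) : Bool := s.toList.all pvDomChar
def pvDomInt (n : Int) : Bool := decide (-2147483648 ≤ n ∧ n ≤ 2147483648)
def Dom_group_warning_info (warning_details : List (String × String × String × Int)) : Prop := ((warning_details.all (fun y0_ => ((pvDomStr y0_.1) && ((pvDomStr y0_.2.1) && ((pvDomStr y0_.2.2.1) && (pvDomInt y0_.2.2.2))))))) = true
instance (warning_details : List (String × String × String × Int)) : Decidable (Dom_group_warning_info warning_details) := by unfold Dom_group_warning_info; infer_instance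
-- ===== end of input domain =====

-- B replaces A's dict-of-lists with per-group sorting by ONE global stable sort by time
-- plus a filtered pass per distinct text (alternative decomposition, same result).

-- ===== PORT A =====
def group_warning_info (warning_details : List (String × String × String × Int)) : List (List (String × String × String × Int)) :=
  let group : PySem.Dict String (List (String × String × String × Int)) :=
    warning_details.foldl (fun g detail =>
      let ty := detail.1; let dr := detail.2.1; let tx := detail.2.2.1; let tm := detail.2.2.2
      if g.contains tx then g.modify tx [] (fun v => v ++ [(ty, dr, tx, tm)])
      else g.insert tx [(ty, dr, tx, tm)]) PySem.Dict.empty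
  group.keys.map (fun text => PySem.List.sorted (group.getD text []) (fun x => x.2.2.2))

-- ===== PORT B =====
def group_warning_info_alt (warning_details : List (String × String × String × Int)) : List (List (String × String × String × Int)) :=
  let texts := PySem.List.dedup (warning_details.map (fun d => d.2.2.1))
  let by_time := PySem.List.sorted warning_details (fun x => x.2.2.2)
  texts.map (fun t =>
    (by_time.filter (fun p => p.2.2.1 == t)).map (fun p => (p.1, p.2.1, p.2.2.1, p.2.2.2)))

-- ===== PRECONDITION & SPEC =====
def Spec_group_warning_info (warning_details : List (String × String × String × Int)) (out : List (List (String × String × String × Int))) : Prop := out = group_warning_info_alt warning_details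
instance (warning_details : List (String × String × String × Int)) (out : List (List (String × String × String × Int))) : Decidable (Spec_group_warning_info warning_details out) := by unfold Spec_group_warning_info; infer_instance

-- ===== CLAIM (what is proved, stated in full; the proofs are below) =====
def Claim_equal_group_warning_info : Prop := ∀ (warning_details : List (String × String × String × Int)), Dom_group_warning_info warning_details → Spec_group_warning_info warning_details (group_warning_info warning_details)

-- ===== LEMMAS AND PROOFS =====

-- A's two branches are one and the same dict update (modify IS insert of the extended value).
theorem pv_stepA_eq_modify {g : PySem.Dict String (List (String × String × String × Int))}
    (detail : String × String × String × Int) :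
    (if g.contains detail.2.2.1 then
        g.modify detail.2.2.1 [] (fun v => v ++ [(detail.1, detail.2.1, detail.2.2.1, detail.2.2.2)])
      else g.insert detail.2.2.1 [(detail.1, detail.2.1, detail.2.2.1, detail.2.2.2)])
      = g.modify detail.2.2.1 [] (fun v => v ++ [detail]) := by
  by_cases h : g.contains detail.2.2.1 = true
  · simp [h]
  · simp only [Bool.not_eq_true] at h
    simp [h, PySem.Dict.modify, PySem.Dict.getD_of_not_contains g [] h]

-- filtering commutes with a stable insertion into a key-sorted list
theorem pv_filter_insertBy {α : Type} (key : α → Int) (p : α → Bool) (x : α) (ys : List α)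
    (hys : ys.Pairwise (fun a b => key a ≤ key b)) :
    (PySem.List.insertBy (fun a b => decide (key a < key b)) x ys).filter p
      = if p x then PySem.List.insertBy (fun a b => decide (key a < key b)) x (ys.filter p)
        else ys.filter p := by
  induction ys with
  | nil =>
    by_cases hpx : p x = true
    · simp [PySem.List.insertBy, hpx]
    · simp only [Bool.not_eq_true] at hpx; simp [PySem.List.insertBy, hpx]
  | cons y ys ih =>
    rcases List.pairwise_cons.mp hys with ⟨hy, htl⟩
    by_cases hlt : key x < key y
    · -- x goes in front of y
      have hfront : ∀ zs : List α, (∀ z ∈ zs, key y ≤ key z) →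
          PySem.List.insertBy (fun a b => decide (key a < key b)) x zs = x :: zs := by
        intro zs hzs
        cases zs with
        | nil => simp [PySem.List.insertBy]
        | cons z zs =>
          have : key x < key z := lt_of_lt_of_le hlt (hzs z (by simp))
          simp [PySem.List.insertBy, this]
      simp only [PySem.List.insertBy, hlt, decide_true, if_true]
      by_cases hpx : p x = true
      · by_cases hpy : p y = true
        · simp [hpx, hpy, hfront (y :: ys.filter p)
            (by intro z hz; rcases List.mem_cons.mp hz with h | h
                · subst h; exact le_refl _
                · exact hy z (List.mem_of_mem_filter h))]
        · simp only [Bool.not_eq_true] at hpy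
          simp [hpx, hpy, hfront (ys.filter p)
            (fun z hz => hy z (List.mem_of_mem_filter hz))]
      · simp only [Bool.not_eq_true] at hpx
        simp [hpx]
    · -- x goes after y
      simp only [PySem.List.insertBy, hlt, decide_false, Bool.false_eq_true, if_false]
      by_cases hpy : p y = true
      · by_cases hpx : p x = true
        · simp only [List.filter_cons, hpy, if_true, hpx, ih htl]
          simp [PySem.List.insertBy, hlt]
        · simp only [Bool.not_eq_true] at hpx
          simp [hpy, hpx, ih htl]
      · simp only [Bool.not_eq_true] at hpy
        simp [hpy, ih htl]

-- one global stable sort then filter = filter then sort (stability)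
theorem pv_filter_sorted {α : Type} (key : α → Int) (p : α → Bool) (l : List α) :
    (PySem.List.sorted l key).filter p = PySem.List.sorted (l.filter p) key := by
  induction l using List.reverseRecOn with
  | nil => simp [PySem.List.sorted_eq_foldl_insertBy]
  | append_singleton l x ih =>
    rw [PySem.List.sorted_eq_foldl_insertBy (l ++ [x]), List.foldl_append,
        ← PySem.List.sorted_eq_foldl_insertBy l, List.foldl_cons, List.foldl_nil,
        pv_filter_insertBy key p x _ (PySem.List.sorted_pairwise l key), ih,
        List.filter_append]
    by_cases hpx : p x = true
    · simp only [if_true, List.filter_cons, List.filter_nil, hpx]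
      rw [PySem.List.sorted_eq_foldl_insertBy (l.filter p ++ [x]), List.foldl_append,
          ← PySem.List.sorted_eq_foldl_insertBy (l.filter p), List.foldl_cons, List.foldl_nil]
    · simp only [Bool.not_eq_true] at hpx
      simp [hpx]

-- A's dict characterised: keys in first-appearance order, each value the subsequence of its text
theorem pv_groupA (l : List (String × String × String × Int)) :
    (l.foldl (fun g detail =>
      let ty := detail.1; let dr := detail.2.1; let tx := detail.2.2.1; let tm := detail.2.2.2
      if g.contains tx then g.modify tx [] (fun v => v ++ [(ty, dr, tx, tm)])
      else g.insert tx [(ty, dr, tx, tm)])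
      (PySem.Dict.empty : PySem.Dict String (List (String × String × String × Int))))
    = l.foldl (fun g detail => g.modify detail.2.2.1 [] (fun v => v ++ [detail])) PySem.Dict.empty := by
  congr 1
  funext g detail
  exact pv_stepA_eq_modify detail

-- ===== VERDICT (by name: the statement is the Claim_ definition above) =====
theorem group_warning_info_spec : Claim_equal_group_warning_info := by
  intro l _
  unfold Spec_group_warning_info group_warning_info group_warning_info_alt
  dsimp only
  rw [pv_groupA]
  have hfold : (List.foldl (fun g detail => g.modify detail.2.2.1 [] fun v => v ++ [detail])
      (PySem.Dict.empty : PySem.Dict String (List (String × String × String × Int))) l)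
      = List.foldl (fun d q => d.modify q.1 [] fun v => v ++ [q.2]) PySem.Dict.empty
          (l.map (fun p => (p.2.2.1, p))) := by
    rw [List.foldl_map]
  rw [hfold]
  have hkeys := PySem.Dict.keys_foldl_modify_key (l.map (fun p => (p.2.2.1, p)))
      (fun q : String × (String × String × String × Int) => q.1)
      ([] : List (String × String × String × Int))
      (fun _ q v => v ++ [q.2]) PySem.Dict.empty
  simp only [] at hkeys
  rw [hkeys, PySem.Dict.keys_empty, PySem.Set.update_nil_left]
  have htexts : PySem.Set.ofList ((l.map (fun p => (p.2.2.1, p))).map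
      (fun q : String × (String × String × String × Int) => q.1))
      = PySem.List.dedup (l.map (fun d => d.2.2.1)) := by
    simp [List.map_map, Function.comp_def]
  rw [htexts]
  apply List.map_congr_left
  intro t _
  rw [PySem.Dict.getD_foldl_modify_append]
  have hfilt : List.filter (fun q => q.1 == t) (l.map (fun p => (p.2.2.1, p)))
      = (l.filter (fun p => p.2.2.1 == t)).map (fun p => (p.2.2.1, p)) := by
    rw [List.filter_map]; rfl
  rw [hfilt]
  simp only [List.map_map, PySem.Dict.getD_empty, List.nil_append]
  have hmapid : ((l.filter (fun p => p.2.2.1 == t)).map ((fun q : String × (String × String × String × Int) => q.2) ∘ (fun p => (p.2.2.1, p)))) = l.filter (fun p => p.2.2.1 == t) := by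
    simp [Function.comp_def]
  rw [hmapid, ← pv_filter_sorted]
  simp
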